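-- pv_equiv track=rewrite | github.com/haddocksmack/matt_parker_maths_puzzles | million_bank_balance.py | check_balances
-- ===== SOURCE A (Python) =====
-- def gen_sequence(deposit_1, deposit_2):
--     bal_1 = deposit_1
--     bal_2 = deposit_1 + deposit_2
--     new_bal = bal_1 + bal_2
--     day = 3
--     while new_bal < 1000000:
--         old_bal = new_bal
--         new_bal += bal_2
--         bal_2 = old_bal
--         day += 1
--         if new_bal == 1000000:
--             winning_balance = {'Deposit 1': deposit_1,
--                                'Deposit 2': deposit_2,
--                                'Days': day}
--             return winning_balance
--
-- def check_balances(end_num):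
--     winners = []
--     for i in range(1, end_num):
--         for j in range(1, end_num):
--             deposit_1 = i
--             deposit_2 = j
--             if gen_sequence(deposit_1, deposit_2) != None:
--                 winners.append(gen_sequence(deposit_1, deposit_2))
--     return winners
-- ===== SOURCE B (Python) =====
-- def check_balances(end_num):
--     # Table of (F_day, F_{day-1}, day) for balance = F_day*d1 + F_{day-1}*d2,
--     # listed in DESCENDING day order so that, per deposit_1, the solved
--     # deposit_2 values come out in ascending order (no sort needed).
--     table = []
--     f_prev, f_cur, day = 2, 3, 4
--     while f_cur + f_prev <= 1000000:
--         table.append((f_cur, f_prev, day))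
--         f_prev, f_cur, day = f_cur, f_cur + f_prev, day + 1
--     table.reverse()
--     winners = []
--     for i in range(1, end_num):
--         for f_d, f_dm1, d in table:
--             rem = 1000000 - f_d * i
--             if rem >= f_dm1 and rem % f_dm1 == 0:
--                 j = rem // f_dm1
--                 if j < end_num:
--                     winners.append({'Deposit 1': i, 'Deposit 2': j, 'Days': d})
--     return winners
-- ===== Notes on version B (the rewrite author's own statement) =====
-- stated objective: faster
-- what changed: Instead of simulating the Fibonacci-like balance day by day for every (deposit_1, deposit_2) pair, B precomputes the 26 feasible (fib(day), fib(day-1), day) coefficient rows and, per deposit_1, solves fib(day)*d1 + fib(day-1)*d2 = 1000000 for deposit_2 by divisibility, emitting rows in descending-day order which yields deposit_2 ascending without sorting.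
import Mathlib
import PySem

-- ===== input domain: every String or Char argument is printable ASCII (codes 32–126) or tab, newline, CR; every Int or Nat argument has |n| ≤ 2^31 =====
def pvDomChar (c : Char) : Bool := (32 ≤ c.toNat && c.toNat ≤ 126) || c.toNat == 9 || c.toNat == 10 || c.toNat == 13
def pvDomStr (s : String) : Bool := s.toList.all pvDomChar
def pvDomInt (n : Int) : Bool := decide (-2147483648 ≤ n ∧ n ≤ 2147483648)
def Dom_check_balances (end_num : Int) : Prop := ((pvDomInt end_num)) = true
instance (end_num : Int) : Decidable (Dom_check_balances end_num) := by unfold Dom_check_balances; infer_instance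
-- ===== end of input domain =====

-- B replaces A's per-pair day-by-day simulation by solving, per deposit_1 and per day,
-- the linear equation fib(day)*d1 + fib(day-1)*d2 = 1000000 for deposit_2 (objective: faster).

-- ===== PORT A =====
-- the while loop of gen_sequence; the fuel argument only totalizes it (on the inputs
-- check_balances passes, new_bal grows by at least 2 per iteration, so 1000000 steps never bind)
def genLoop (deposit_1 deposit_2 : Int) (bal_2 new_bal day : Int) : Nat → Option (List (String × Int))
  | 0 => none
  | fuel+1 =>
    if new_bal < 1000000 then
      let old_bal := new_bal
      let new_bal' := new_bal + bal_2
      let bal_2' := old_bal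
      let day' := day + 1
      if new_bal' = 1000000 then
        some [("Deposit 1", deposit_1), ("Deposit 2", deposit_2), ("Days", day')]
      else
        genLoop deposit_1 deposit_2 bal_2' new_bal' day' fuel
    else none

def gen_sequence (deposit_1 deposit_2 : Int) : Option (List (String × Int)) :=
  let bal_1 := deposit_1
  let bal_2 := deposit_1 + deposit_2
  let new_bal := bal_1 + bal_2
  genLoop deposit_1 deposit_2 bal_2 new_bal 3 1000000

def check_balances (end_num : Int) : List (List (String × Int)) :=
  (PySem.List.pyRange 1 end_num 1).foldl (fun winners i =>
    (PySem.List.pyRange 1 end_num 1).foldl (fun winners j =>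
      if gen_sequence i j ≠ none then winners ++ (gen_sequence i j).toList
      else winners) winners) []

-- ===== PORT B =====
-- the while loop building the (F_day, F_{day-1}, day) table; fuel only totalizes it
def tableLoop (f_prev f_cur day : Int) : Nat → List (Int × Int × Int)
  | 0 => []
  | fuel+1 =>
    if f_cur + f_prev ≤ 1000000 then
      (f_cur, f_prev, day) :: tableLoop f_cur (f_cur + f_prev) (day + 1) fuel
    else []

def check_balances_alt (end_num : Int) : List (List (String × Int)) :=
  let table := (tableLoop 2 3 4 1000000).reverse
  (PySem.List.pyRange 1 end_num 1).foldl (fun winners i =>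
    table.foldl (fun winners e =>
      let rem := 1000000 - e.1 * i
      if e.2.1 ≤ rem ∧ PySem.Int.mod rem e.2.1 = 0 then
        let j := PySem.Int.floordiv rem e.2.1
        if j < end_num then
          winners ++ [[("Deposit 1", i), ("Deposit 2", j), ("Days", e.2.2)]]
        else winners
      else winners) winners) []

-- ===== PRECONDITION & SPEC =====
def Spec_check_balances (end_num : Int) (out : List (List (String × Int))) : Prop := out = check_balances_alt end_num
instance (end_num : Int) (out : List (List (String × Int))) : Decidable (Spec_check_balances end_num out) := by unfold Spec_check_balances; infer_instance

-- ===== CLAIM (what is proved, stated in full; the proofs are below) =====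
def Claim_equal_check_balances : Prop := ∀ (end_num : Int), Dom_check_balances end_num → Spec_check_balances end_num (check_balances end_num)

-- ===== LEMMAS AND PROOFS =====

-- the table of (fib day, fib (day-1), day) for days 4..29, day descending
def FTAB : List (Int × Int × Int) := [(514229, 317811, 29), (317811, 196418, 28), (196418, 121393, 27), (121393, 75025, 26), (75025, 46368, 25), (46368, 28657, 24), (28657, 17711, 23), (17711, 10946, 22), (10946, 6765, 21), (6765, 4181, 20), (4181, 2584, 19), (2584, 1597, 18), (1597, 987, 17), (987, 610, 16), (610, 377, 15), (377, 233, 14), (233, 144, 13), (144, 89, 12), (89, 55, 11), (55, 34, 10), (34, 21, 9), (21, 13, 8), (13, 8, 7), (8, 5, 6), (5, 3, 5), (3, 2, 4)]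

theorem tab_eq : (tableLoop 2 3 4 1000000).reverse = FTAB := by decide

theorem ftab_spec : ∀ e ∈ FTAB, e.1 = (Nat.fib e.2.2.toNat : Int) ∧ e.2.1 = (Nat.fib (e.2.2.toNat - 1) : Int) ∧ (e.2.2.toNat : Int) = e.2.2 ∧ 4 ≤ e.2.2.toNat ∧ e.2.2.toNat ≤ 29 ∧ 1 ≤ e.2.1 ∧ 1 ≤ e.1 := by decide

theorem ftab_days : ∀ D : Nat, D < 30 → 4 ≤ D → ((Nat.fib D : Int), ((Nat.fib (D-1) : Int), (D : Int))) ∈ FTAB := by decide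

theorem ftab_pairwise : FTAB.Pairwise (fun e e' => e'.1 < e.1 ∧ e'.2.1 < e.2.1 ∧ 1 ≤ e'.2.1 ∧ 1 ≤ e.2.1) := by decide

theorem ftab_pairwise_symm : FTAB.Pairwise (fun e e' => (e.1 < e'.1 ∧ e.2.1 < e'.2.1) ∨ (e'.1 < e.1 ∧ e'.2.1 < e.2.1)) := by decide

def win (i j d : Int) : List (String × Int) := [("Deposit 1", i), ("Deposit 2", j), ("Days", d)]

def hit? (i j : Int) : Option (Int × Int × Int) := FTAB.find? (fun e => e.1 * i + e.2.1 * j == 1000000)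

-- balance on day d, and the bal_2 variable on day d, as linear forms in the deposits
def nb (i j : Int) (d : Nat) : Int := (Nat.fib d : Int) * i + (Nat.fib (d-1) : Int) * j
def bl2 (i j : Int) (d : Nat) : Int := (Nat.fib (d-1) : Int) * i + (Nat.fib (d-2) : Int) * j

theorem nb_succ (i j : Int) (d : Nat) (hd : 3 ≤ d) : nb i j (d+1) = nb i j d + bl2 i j d := by
  obtain ⟨m, rfl⟩ : ∃ m, d = m + 3 := ⟨d - 3, by omega⟩
  unfold nb bl2
  have h1 : Nat.fib (m+4) = Nat.fib (m+2) + Nat.fib (m+3) := Nat.fib_add_two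
  have h2 : Nat.fib (m+3) = Nat.fib (m+1) + Nat.fib (m+2) := Nat.fib_add_two
  have e1 : m + 3 + 1 = m + 4 := by omega
  have e2 : m + 3 + 1 - 1 = m + 3 := by omega
  have e3 : m + 3 - 1 = m + 2 := by omega
  have e4 : m + 3 - 2 = m + 1 := by omega
  rw [e1, e2, e3, e4, h1, h2]
  push_cast; ring

theorem bl2_eq_nb (i j : Int) (d : Nat) (hd : 3 ≤ d) : bl2 i j (d+1) = nb i j d := by
  unfold nb bl2
  have e1 : d + 1 - 1 = d := by omega
  have e2 : d + 1 - 2 = d - 1 := by omega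
  rw [e1, e2]

theorem bl2_ge (i j : Int) (hi : 1 ≤ i) (hj : 1 ≤ j) (d : Nat) (hd : 3 ≤ d) : 2 ≤ bl2 i j d := by
  unfold bl2
  have ha : (1:Int) ≤ (Nat.fib (d-1) : Int) := by exact_mod_cast Nat.fib_pos.mpr (by omega)
  have hb : (1:Int) ≤ (Nat.fib (d-2) : Int) := by exact_mod_cast Nat.fib_pos.mpr (by omega)
  nlinarith

theorem nb_mono (i j : Int) (hi : 1 ≤ i) (hj : 1 ≤ j) (d d' : Nat) (hd : 3 ≤ d) (h : d < d') : nb i j d < nb i j d' := by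
  induction d' with
  | zero => omega
  | succ m ih =>
    rcases Nat.lt_succ_iff_lt_or_eq.mp h with h' | h'
    · have := ih h'
      have h3 : 3 ≤ m := by omega
      have := bl2_ge i j hi hj m h3
      have := nb_succ i j m h3
      omega
    · subst h'
      have := bl2_ge i j hi hj d hd
      have := nb_succ i j d hd
      omega

theorem nb_big (i j : Int) (hi : 1 ≤ i) (hj : 1 ≤ j) (d : Nat) (hd : 30 ≤ d) : 1000000 < nb i j d := by
  unfold nb
  have h1 : (832040:Nat) ≤ Nat.fib d := by
    calc (832040:Nat) = Nat.fib 30 := by decide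
    _ ≤ Nat.fib d := Nat.fib_mono hd
  have h2 : (514229:Nat) ≤ Nat.fib (d-1) := by
    calc (514229:Nat) = Nat.fib 29 := by decide
    _ ≤ Nat.fib (d-1) := Nat.fib_mono (by omega)
  have h1' : (832040:Int) ≤ (Nat.fib d : Int) := by exact_mod_cast h1
  have h2' : (514229:Int) ≤ (Nat.fib (d-1) : Int) := by exact_mod_cast h2
  nlinarith

theorem genLoop_none (i j : Int) :
    ∀ (fuel : Nat) (d : Nat), 3 ≤ d → (∀ d', d < d' → nb i j d' ≠ 1000000) →
    genLoop i j (bl2 i j d) (nb i j d) (d : Int) fuel = none := by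
  intro fuel
  induction fuel with
  | zero => intro d _ _; rfl
  | succ f ih =>
    intro d hd hno
    show genLoop i j (bl2 i j d) (nb i j d) (d : Int) (f+1) = none
    rw [genLoop]
    split
    · have hnb : nb i j d + bl2 i j d = nb i j (d+1) := (nb_succ i j d hd).symm
      have hne : nb i j d + bl2 i j d ≠ 1000000 := by
        rw [hnb]; exact hno (d+1) (by omega)
      simp only [if_neg hne]
      have hb : nb i j d = bl2 i j (d+1) := (bl2_eq_nb i j d hd).symm
      have hc : (d : Int) + 1 = ((d+1 : Nat) : Int) := by push_cast; ring
      rw [hnb, hb, hc]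
      exact ih (d+1) (by omega) (fun d' h => hno d' (by omega))
    · rfl

theorem genLoop_hit (i j : Int) (hi : 1 ≤ i) (hj : 1 ≤ j) :
    ∀ (k : Nat), ∀ (d : Nat) (fuel : Nat), 3 ≤ d → k < fuel →
    nb i j (d+k+1) = 1000000 →
    genLoop i j (bl2 i j d) (nb i j d) (d : Int) fuel = some (win i j ((d+k+1 : Nat) : Int)) := by
  intro k
  induction k with
  | zero =>
    intro d fuel hd hf hhit
    obtain ⟨f, rfl⟩ : ∃ f, fuel = f + 1 := ⟨fuel - 1, by omega⟩
    rw [genLoop]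
    have hlt : nb i j d < 1000000 := by
      have := nb_mono i j hi hj d (d+0+1) hd (by omega); omega
    rw [if_pos hlt]
    have hnb : nb i j d + bl2 i j d = nb i j (d+1) := (nb_succ i j d hd).symm
    have heq : nb i j d + bl2 i j d = 1000000 := by
      rw [hnb]; simpa using hhit
    simp only [if_pos heq]
    unfold win
    have : (d : Int) + 1 = ((d+0+1 : Nat) : Int) := by push_cast; ring
    rw [this]
  | succ k ih =>
    intro d fuel hd hf hhit
    obtain ⟨f, rfl⟩ : ∃ f, fuel = f + 1 := ⟨fuel - 1, by omega⟩
    rw [genLoop]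
    have hlt : nb i j d < 1000000 := by
      have := nb_mono i j hi hj d (d+(k+1)+1) hd (by omega); omega
    rw [if_pos hlt]
    have hnb : nb i j d + bl2 i j d = nb i j (d+1) := (nb_succ i j d hd).symm
    have hne : nb i j d + bl2 i j d ≠ 1000000 := by
      rw [hnb]
      have := nb_mono i j hi hj (d+1) (d+(k+1)+1) (by omega) (by omega)
      omega
    simp only [if_neg hne]
    have hb : nb i j d = bl2 i j (d+1) := (bl2_eq_nb i j d hd).symm
    have hc : (d : Int) + 1 = ((d+1 : Nat) : Int) := by push_cast; ring
    rw [hnb, hb, hc]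
    have := ih (d+1) f (by omega) (by omega) (by convert hhit using 2; omega)
    convert this using 3
    omega

theorem gen_eq (i j : Int) (hi : 1 ≤ i) (hj : 1 ≤ j) :
    gen_sequence i j = (hit? i j).map (fun e => win i j e.2.2) := by
  unfold gen_sequence
  have hb : i + j = bl2 i j 3 := by
    unfold bl2
    norm_num [show Nat.fib 2 = 1 from rfl, show Nat.fib 1 = 1 from rfl]
  have hn : i + (i + j) = nb i j 3 := by
    unfold nb
    norm_num [show Nat.fib 3 = 2 from rfl, show Nat.fib 2 = 1 from rfl]
    ring
  have h3 : ((3:Nat) : Int) = (3:Int) := by norm_num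
  show genLoop i j (i + j) (i + (i + j)) 3 1000000 = Option.map (fun e => win i j e.2.2) (hit? i j)
  rw [hn, hb, ← h3]
  cases hfind : hit? i j with
  | some e =>
    unfold hit? at hfind
    have hmem : e ∈ FTAB := List.mem_of_find?_eq_some hfind
    have hpred := List.find?_some hfind
    have heq : e.1 * i + e.2.1 * j = 1000000 := by simpa using hpred
    obtain ⟨s1, s2, s3, s4, s5, s6, s7⟩ := ftab_spec e hmem
    have hhit : nb i j e.2.2.toNat = 1000000 := by
      unfold nb; rw [← s1, ← s2]; exact heq
    have hrun := genLoop_hit i j hi hj (e.2.2.toNat - 4) 3 1000000 (by norm_num) (by omega)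
      (by rw [show 3 + (e.2.2.toNat - 4) + 1 = e.2.2.toNat by omega]; exact hhit)
    rw [show 3 + (e.2.2.toNat - 4) + 1 = e.2.2.toNat by omega] at hrun
    rw [hrun, s3]
    rfl
  | none =>
    unfold hit? at hfind
    have hno := List.find?_eq_none.mp hfind
    have hnone : ∀ d', 3 < d' → nb i j d' ≠ 1000000 := by
      intro d' hgt heq
      by_cases hle : d' ≤ 29
      · have hmem := ftab_days d' (by omega) (by omega)
        apply hno _ hmem
        simp only [beq_iff_eq]
        unfold nb at heq
        exact heq
      · exact absurd heq (ne_of_gt (nb_big i j hi hj d' (by omega)))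
    rw [genLoop_none i j 1000000 3 (by norm_num) hnone]
    rfl

-- candidate pair (deposit_2, day) per table entry, and the two per-deposit_1 pair lists
def Bcand (en i : Int) (e : Int × Int × Int) : Option (Int × Int) :=
  if e.2.1 ≤ 1000000 - e.1 * i ∧ PySem.Int.mod (1000000 - e.1 * i) e.2.1 = 0 ∧ PySem.Int.floordiv (1000000 - e.1 * i) e.2.1 < en
  then some (PySem.Int.floordiv (1000000 - e.1 * i) e.2.1, e.2.2) else none

def Apairs (en i : Int) : List (Int × Int) := (PySem.List.pyRange 1 en 1).filterMap (fun j => (hit? i j).map (fun e => (j, e.2.2)))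
def Bpairs (en i : Int) : List (Int × Int) := FTAB.filterMap (Bcand en i)

theorem bcand_iff (en i : Int) (e : Int × Int × Int) (hm : 1 ≤ e.2.1) (p : Int × Int) :
    Bcand en i e = some p ↔ (e.1 * i + e.2.1 * p.1 = 1000000 ∧ 1 ≤ p.1 ∧ p.1 < en ∧ p.2 = e.2.2) := by
  obtain ⟨fd, fdm, dy⟩ := e
  obtain ⟨p1, p2⟩ := p
  simp only at hm ⊢
  unfold Bcand
  simp only
  constructor
  · intro h
    split_ifs at h with hc
    · obtain ⟨hc1, hc2, hc3⟩ := hc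
      obtain ⟨hp1, hp2⟩ : PySem.Int.floordiv (1000000 - fd * i) fdm = p1 ∧ dy = p2 := by
        have := Option.some.inj h
        exact ⟨congrArg Prod.fst this, congrArg Prod.snd this⟩
      have hdvd : fdm ∣ (1000000 - fd * i) := (PySem.Int.mod_eq_zero_iff_dvd _ _).mp hc2
      have hfd : PySem.Int.floordiv (1000000 - fd * i) fdm = (1000000 - fd * i) / fdm :=
        PySem.Int.floordiv_eq_ediv_of_pos (by omega)
      have hcan : fdm * ((1000000 - fd * i) / fdm) = 1000000 - fd * i := Int.mul_ediv_cancel' hdvd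
      have hge1 : 1 ≤ p1 := by
        rw [← hp1, (PySem.Int.le_floordiv_iff_mul_le (by omega))]
        omega
      refine ⟨?_, hge1, by rw [← hp1]; exact hc3, hp2.symm⟩
      rw [← hp1, hfd]
      omega
  · rintro ⟨heq, hge1, hlt, hpd⟩
    have hrem : 1000000 - fd * i = fdm * p1 := by omega
    have hdvd : fdm ∣ (1000000 - fd * i) := ⟨p1, hrem⟩
    have hfl : PySem.Int.floordiv (1000000 - fd * i) fdm = p1 := by
      rw [PySem.Int.floordiv_eq_ediv_of_pos (by omega), hrem]
      exact Int.mul_ediv_cancel_left p1 (by omega)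
    have hge : fdm ≤ 1000000 - fd * i := by nlinarith
    have hmod : PySem.Int.mod (1000000 - fd * i) fdm = 0 := (PySem.Int.mod_eq_zero_iff_dvd _ _).mpr hdvd
    rw [if_pos ⟨hge, hmod, by rw [hfl]; exact hlt⟩, hfl, hpd]

theorem keyL {fd fdm fd' fdm' i j j' : Int} (h1 : fd' < fd) (h2 : fdm' < fdm) (hm : 1 ≤ fdm')
    (hi : 1 ≤ i) (hj : 1 ≤ j)
    (e1 : fd * i + fdm * j = 1000000) (e2 : fd' * i + fdm' * j' = 1000000) : j < j' := by
  nlinarith [mul_le_mul_of_nonneg_right h2.le (by linarith : (0:Int) ≤ j)]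

theorem uniq (i j : Int) (hi : 1 ≤ i) (hj : 1 ≤ j) {e e' : Int × Int × Int}
    (he : e ∈ FTAB) (he' : e' ∈ FTAB)
    (h1 : e.1 * i + e.2.1 * j = 1000000) (h2 : e'.1 * i + e'.2.1 * j = 1000000) : e = e' := by
  by_contra hne
  have hsym : Symmetric (fun (a b : Int × Int × Int) => (a.1 < b.1 ∧ a.2.1 < b.2.1) ∨ (b.1 < a.1 ∧ b.2.1 < a.2.1)) :=
    fun a b h => h.elim Or.inr Or.inl
  have hR := List.Pairwise.forall hsym ftab_pairwise_symm he he' hne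
  obtain ⟨_, _, _, _, _, hm1, _⟩ := ftab_spec e he
  obtain ⟨_, _, _, _, _, hm2, _⟩ := ftab_spec e' he'
  rcases hR with ⟨ha, hb⟩ | ⟨ha, hb⟩
  · exact absurd (keyL ha hb hm1 hi hj h2 h1) (lt_irrefl j)
  · exact absurd (keyL ha hb hm2 hi hj h1 h2) (lt_irrefl j)

theorem hit?_eq_some_iff (i j : Int) (hi : 1 ≤ i) (hj : 1 ≤ j) (e : Int × Int × Int) :
    hit? i j = some e ↔ e ∈ FTAB ∧ e.1 * i + e.2.1 * j = 1000000 := by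
  constructor
  · intro h
    exact ⟨List.mem_of_find?_eq_some h, by simpa using List.find?_some h⟩
  · rintro ⟨hmem, heq⟩
    cases hfind : hit? i j with
    | none =>
      have := List.find?_eq_none.mp hfind e hmem
      simp only [beq_iff_eq] at this
      exact absurd heq this
    | some e' =>
      have hm' : e' ∈ FTAB := List.mem_of_find?_eq_some hfind
      have hp' : e'.1 * i + e'.2.1 * j = 1000000 := by simpa using List.find?_some hfind
      rw [uniq i j hi hj hm' hmem hp' heq]

theorem memA (en i : Int) (hi : 1 ≤ i) (p : Int × Int) :
    p ∈ Apairs en i ↔ ∃ e ∈ FTAB, e.1 * i + e.2.1 * p.1 = 1000000 ∧ 1 ≤ p.1 ∧ p.1 < en ∧ p.2 = e.2.2 := by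
  unfold Apairs
  simp only [List.mem_filterMap, Option.map_eq_some_iff, PySem.List.mem_pyRange_one]
  constructor
  · rintro ⟨j, ⟨hj1, hj2⟩, e, hfind, rfl⟩
    obtain ⟨hmem, heq⟩ := (hit?_eq_some_iff i j hi hj1 e).mp hfind
    exact ⟨e, hmem, heq, hj1, hj2, rfl⟩
  · rintro ⟨e, hmem, heq, hp1, hp2, hpd⟩
    refine ⟨p.1, ⟨hp1, hp2⟩, e, (hit?_eq_some_iff i p.1 hi hp1 e).mpr ⟨hmem, heq⟩, ?_⟩
    obtain ⟨a, b⟩ := p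
    simp only at hpd
    rw [hpd]

theorem memB (en i : Int) (p : Int × Int) :
    p ∈ Bpairs en i ↔ ∃ e ∈ FTAB, e.1 * i + e.2.1 * p.1 = 1000000 ∧ 1 ≤ p.1 ∧ p.1 < en ∧ p.2 = e.2.2 := by
  unfold Bpairs
  simp only [List.mem_filterMap]
  constructor
  · rintro ⟨e, hmem, hc⟩
    obtain ⟨_, _, _, _, _, hm1, _⟩ := ftab_spec e hmem
    exact ⟨e, hmem, (bcand_iff en i e hm1 p).mp hc⟩
  · rintro ⟨e, hmem, hprop⟩
    obtain ⟨_, _, _, _, _, hm1, _⟩ := ftab_spec e hmem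
    exact ⟨e, hmem, (bcand_iff en i e hm1 p).mpr hprop⟩

theorem ApairsPW (en i : Int) : (Apairs en i).Pairwise (fun p q => p.1 < q.1) := by
  unfold Apairs
  refine List.Pairwise.filterMap _ ?_ (PySem.List.pairwise_lt_pyRange_one 1 en)
  rintro a b hab c hc d hd
  simp only [Option.map_eq_some_iff] at hc hd
  obtain ⟨e1, _, rfl⟩ := hc
  obtain ⟨e2, _, rfl⟩ := hd
  exact hab

theorem BpairsPW (en i : Int) (hi : 1 ≤ i) : (Bpairs en i).Pairwise (fun p q => p.1 < q.1) := by
  unfold Bpairs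
  refine List.Pairwise.filterMap _ ?_ ftab_pairwise
  rintro a b hab c hc d hd
  obtain ⟨hba1, hba2, hbm, ham⟩ := hab
  obtain ⟨hceq, hc1, _, _⟩ := (bcand_iff en i a ham c).mp hc
  obtain ⟨hdeq, hd1, _, _⟩ := (bcand_iff en i b hbm d).mp hd
  exact keyL hba1 hba2 hbm hi hc1 hceq hdeq

theorem pairs_eq (en i : Int) (hi : 1 ≤ i) : Apairs en i = Bpairs en i := by
  have hA := ApairsPW en i
  have hB := BpairsPW en i hi
  have ndA : (Apairs en i).Nodup := hA.imp (fun {a b} h => by intro hab; rw [hab] at h; exact absurd h (lt_irrefl _))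
  have ndB : (Bpairs en i).Nodup := hB.imp (fun {a b} h => by intro hab; rw [hab] at h; exact absurd h (lt_irrefl _))
  have hperm : (Apairs en i).Perm (Bpairs en i) :=
    (List.perm_ext_iff_of_nodup ndA ndB).mpr (fun p => (memA en i hi p).trans (memB en i p).symm)
  exact hperm.eq_of_pairwise (fun a b _ _ h1 h2 => absurd (lt_trans h1 h2) (lt_irrefl _)) hA hB

theorem innerA (en i : Int) (hi : 1 ≤ i) (acc : List (List (String × Int))) :
    (PySem.List.pyRange 1 en 1).foldl (fun winners j =>
      if gen_sequence i j ≠ none then winners ++ (gen_sequence i j).toList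
      else winners) acc
    = acc ++ (Apairs en i).map (fun p => win i p.1 p.2) := by
  rw [PySem.List.foldl_congr_mem (PySem.List.pyRange 1 en 1)
      (fun winners j => if gen_sequence i j ≠ none then winners ++ (gen_sequence i j).toList else winners)
      (fun w j => w ++ ((hit? i j).map (fun e => win i j e.2.2)).toList)
      acc
      (fun acc' j hjm => by
        dsimp only
        rw [gen_eq i j hi (PySem.List.mem_pyRange_one.mp hjm).1]
        cases hit? i j <;> simp)]
  rw [PySem.List.foldl_append_eq_flatMap]
  congr 1
  have hmap : (Apairs en i).map (fun p => win i p.1 p.2)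
      = (PySem.List.pyRange 1 en 1).filterMap (fun j => (hit? i j).map (fun e => win i j e.2.2)) := by
    unfold Apairs
    rw [List.map_filterMap]
    apply List.filterMap_congr
    intro j _
    cases hit? i j <;> simp
  rw [hmap, List.filterMap_eq_flatMap_toList]

theorem innerB (en i : Int) (acc : List (List (String × Int))) :
    FTAB.foldl (fun winners e =>
      let rem := 1000000 - e.1 * i
      if e.2.1 ≤ rem ∧ PySem.Int.mod rem e.2.1 = 0 then
        let j := PySem.Int.floordiv rem e.2.1
        if j < en then
          winners ++ [[("Deposit 1", i), ("Deposit 2", j), ("Days", e.2.2)]]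
        else winners
      else winners) acc
    = acc ++ (Bpairs en i).map (fun p => win i p.1 p.2) := by
  rw [PySem.List.foldl_congr_mem FTAB
      (fun winners e =>
        let rem := 1000000 - e.1 * i
        if e.2.1 ≤ rem ∧ PySem.Int.mod rem e.2.1 = 0 then
          let j := PySem.Int.floordiv rem e.2.1
          if j < en then
            winners ++ [[("Deposit 1", i), ("Deposit 2", j), ("Days", e.2.2)]]
          else winners
        else winners)
      (fun w e => w ++ ((Bcand en i e).map (fun p => win i p.1 p.2)).toList)
      acc
      (fun acc' e hem => by
        dsimp only
        unfold Bcand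
        split_ifs <;> simp_all [win])]
  rw [PySem.List.foldl_append_eq_flatMap]
  congr 1
  have hmap : (Bpairs en i).map (fun p => win i p.1 p.2)
      = FTAB.filterMap (fun e => (Bcand en i e).map (fun p => win i p.1 p.2)) := by
    unfold Bpairs
    rw [List.map_filterMap]
  rw [hmap, List.filterMap_eq_flatMap_toList]

theorem topA (en : Int) : check_balances en
    = (PySem.List.pyRange 1 en 1).flatMap (fun i => (Apairs en i).map (fun p => win i p.1 p.2)) := by
  unfold check_balances
  rw [PySem.List.foldl_congr_mem (PySem.List.pyRange 1 en 1)
      (fun winners i =>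
        (PySem.List.pyRange 1 en 1).foldl (fun winners j =>
          if gen_sequence i j ≠ none then winners ++ (gen_sequence i j).toList
          else winners) winners)
      (fun w i => w ++ (Apairs en i).map (fun p => win i p.1 p.2))
      []
      (fun acc i him => innerA en i (PySem.List.mem_pyRange_one.mp him).1 acc)]
  rw [PySem.List.foldl_append_eq_flatMap, List.nil_append]

theorem topB (en : Int) : check_balances_alt en
    = (PySem.List.pyRange 1 en 1).flatMap (fun i => (Bpairs en i).map (fun p => win i p.1 p.2)) := by
  unfold check_balances_alt
  rw [tab_eq]
  show List.foldl (fun winners i =>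
      FTAB.foldl (fun winners e =>
        let rem := 1000000 - e.1 * i
        if e.2.1 ≤ rem ∧ PySem.Int.mod rem e.2.1 = 0 then
          let j := PySem.Int.floordiv rem e.2.1
          if j < en then
            winners ++ [[("Deposit 1", i), ("Deposit 2", j), ("Days", e.2.2)]]
          else winners
        else winners) winners) [] (PySem.List.pyRange 1 en 1)
    = (PySem.List.pyRange 1 en 1).flatMap (fun i => (Bpairs en i).map (fun p => win i p.1 p.2))
  rw [PySem.List.foldl_congr_mem (PySem.List.pyRange 1 en 1)
      (fun winners i =>
        FTAB.foldl (fun winners e =>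
          let rem := 1000000 - e.1 * i
          if e.2.1 ≤ rem ∧ PySem.Int.mod rem e.2.1 = 0 then
            let j := PySem.Int.floordiv rem e.2.1
            if j < en then
              winners ++ [[("Deposit 1", i), ("Deposit 2", j), ("Days", e.2.2)]]
            else winners
          else winners) winners)
      (fun w i => w ++ (Bpairs en i).map (fun p => win i p.1 p.2))
      []
      (fun acc i _ => innerB en i acc)]
  rw [PySem.List.foldl_append_eq_flatMap, List.nil_append]

-- ===== VERDICT (by name: the statement is the Claim_ definition above) =====
theorem check_balances_spec : Claim_equal_check_balances := by
  intro en _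
  unfold Spec_check_balances
  rw [topA, topB]
  apply List.flatMap_congr
  intro i him
  rw [pairs_eq en i (PySem.List.mem_pyRange_one.mp him).1]
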